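-- pv_equiv track=rewrite | github.com/JHyuk2/Hyuk2Coding | SWAC/D3/1209.py | diagnoal_list
-- ===== SOURCE A (Python) =====
-- def diagnoal_list(tmp_list):
--     right_sum, left_sum = 0 , 0
--     temp = []
--     for i in range(len(tmp_list)):
--         for j in range(len(tmp_list)):
--             if i == j:
--                 left_sum += tmp_list[i][j]
--             elif (i+j) == (len(tmp_list)-1):
--                 right_sum += tmp_list[i][j]
--
--     temp.append(right_sum)
--     temp.append(left_sum)
--     return temp
-- ===== SOURCE B (Python) =====
-- def diagnoal_list(tmp_list):
--     n = len(tmp_list)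
--     left = sum(row[i] for i, row in enumerate(tmp_list))
--     right = sum(tmp_list[i][n - 1 - i] for i in range(n) if i + i != n - 1)
--     return [right, left]
-- ===== Notes on version B (the rewrite author's own statement) =====
-- stated objective: faster
-- what changed: B indexes only the 2n diagonal cells directly (one pass per diagonal, skipping the shared centre cell) instead of A's nested scan over all n^2 index pairs.
import Mathlib
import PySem

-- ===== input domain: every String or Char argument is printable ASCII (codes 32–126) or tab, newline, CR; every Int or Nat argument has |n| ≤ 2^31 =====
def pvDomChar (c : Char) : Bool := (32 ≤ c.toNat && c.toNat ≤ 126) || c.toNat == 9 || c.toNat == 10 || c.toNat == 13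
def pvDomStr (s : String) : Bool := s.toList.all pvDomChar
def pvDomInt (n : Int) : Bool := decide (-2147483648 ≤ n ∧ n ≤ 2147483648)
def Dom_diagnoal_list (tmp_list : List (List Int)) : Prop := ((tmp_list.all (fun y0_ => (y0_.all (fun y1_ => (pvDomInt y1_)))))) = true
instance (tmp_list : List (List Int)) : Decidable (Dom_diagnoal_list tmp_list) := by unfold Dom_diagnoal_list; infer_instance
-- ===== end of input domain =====

-- B replaces A's nested scan over all n^2 index pairs by a single pass per diagonal,
-- reading only the 2n diagonal cells directly (faster: O(n) vs O(n^2)).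

-- ===== PORT A =====
-- literal transliteration of A's nested loops; pyGetD is exact on Pre_ (A raises IndexError outside it)
def diagnoal_list (tmp_list : List (List Int)) : List Int :=
  let n : Int := PySem.List.len tmp_list
  let rl :=
    (PySem.List.pyRange 0 n 1).foldl (fun (rl : Int × Int) i =>
      (PySem.List.pyRange 0 n 1).foldl (fun (rl : Int × Int) j =>
        if i = j then
          (rl.1, rl.2 + PySem.List.pyGetD (PySem.List.pyGetD tmp_list i []) j 0)
        else if i + j = n - 1 then
          (rl.1 + PySem.List.pyGetD (PySem.List.pyGetD tmp_list i []) j 0, rl.2)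
        else rl) rl) ((0 : Int), (0 : Int))
  [rl.1, rl.2]

-- ===== PORT B =====
-- literal transliteration of Source B; pyGetD is exact on Pre_
def diagnoal_list_alt (tmp_list : List (List Int)) : List Int :=
  let n : Int := PySem.List.len tmp_list
  let left := ((PySem.List.enumerate tmp_list 0).map
      (fun p => PySem.List.pyGetD p.2 p.1 0)).sum
  let right := (((PySem.List.pyRange 0 n 1).filter (fun i => i + i ≠ n - 1)).map
      (fun i => PySem.List.pyGetD (PySem.List.pyGetD tmp_list i []) (n - 1 - i) 0)).sum
  [right, left]

-- ===== PRECONDITION & SPEC =====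
-- Pre_ = exactly the inputs where every accessed diagonal cell exists (A raises IndexError otherwise)
def Pre_diagnoal_list (tmp_list : List (List Int)) : Prop :=
  ∀ i < tmp_list.length,
    i < (tmp_list.getD i []).length ∧ tmp_list.length - 1 - i < (tmp_list.getD i []).length
instance (tmp_list : List (List Int)) : Decidable (Pre_diagnoal_list tmp_list) := by
  unfold Pre_diagnoal_list; infer_instance
def pvWitness_diagnoal_list : List (List Int) := [[1, 2], [3, 4]]

def Spec_diagnoal_list (tmp_list : List (List Int)) (out : List Int) : Prop := out = diagnoal_list_alt tmp_list
instance (tmp_list : List (List Int)) (out : List Int) : Decidable (Spec_diagnoal_list tmp_list out) := by unfold Spec_diagnoal_list; infer_instance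

-- ===== CLAIM (what is proved, stated in full; the proofs are below) =====
def Claim_equal_diagnoal_list : Prop := ∀ (tmp_list : List (List Int)), Dom_diagnoal_list tmp_list → Pre_diagnoal_list tmp_list → Spec_diagnoal_list tmp_list (diagnoal_list tmp_list)

-- ===== LEMMAS AND PROOFS =====

-- value of the (i,k) cell, with the ports' defaults
def pvG (tmp : List (List Int)) (i k : Nat) : Int := (tmp.getD i []).getD k 0
-- per-cell contribution of A's inner loop to right_sum resp. left_sum
def pvR (tmp : List (List Int)) (n i j : Nat) : Int := if i = j then 0 else if i + j = n - 1 then pvG tmp i j else 0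
def pvL (tmp : List (List Int)) (i j : Nat) : Int := if i = j then pvG tmp i j else 0

-- a fold whose step adds componentwise accumulates the two sums
theorem pv_foldl_pair_add {a : Type} (rho lam : a → Int) (L : List a) (r l : Int) :
    L.foldl (fun s x => (s.1 + rho x, s.2 + lam x)) (r, l) = (r + (L.map rho).sum, l + (L.map lam).sum) := by
  induction L generalizing r l with
  | nil => simp
  | cons x xs ih => simp [ih, add_assoc]

theorem pv_filter_map_sum (q : Nat → Bool) (h : Nat → Int) (L : List Nat) :
    ((L.filter q).map h).sum = (L.map (fun x => if q x then h x else 0)).sum := by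
  induction L with
  | nil => rfl
  | cons x xs ih => by_cases hq : q x <;> simp [hq, ih]

theorem pv_list_sum_range (f : Nat → Int) (n : Nat) :
    ((List.range n).map f).sum = Finset.sum (Finset.range n) f := rfl

theorem pv_sum_L (tmp : List (List Int)) (n i : Nat) (hi : i < n) :
    ((List.range n).map (fun j => pvL tmp i j)).sum = pvG tmp i i := by
  rw [pv_list_sum_range]
  simp only [pvL]
  rw [Finset.sum_ite_eq, if_pos (Finset.mem_range.2 hi)]

theorem pv_sum_R (tmp : List (List Int)) (n i : Nat) (hi : i < n) :
    ((List.range n).map (fun j => pvR tmp n i j)).sum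
      = if i + i = n - 1 then 0 else pvG tmp i (n - 1 - i) := by
  rw [pv_list_sum_range]
  simp only [pvR]
  rw [Finset.sum_eq_single (n - 1 - i)]
  · by_cases hc : i + i = n - 1
    · rw [if_pos (by omega : i = n - 1 - i), if_pos hc]
    · rw [if_neg (by omega : ¬ i = n - 1 - i), if_pos (by omega : i + (n - 1 - i) = n - 1), if_neg hc]
  · intro j _ hj
    rw [if_neg (by omega : ¬ i + j = n - 1)]
    split <;> rfl
  · intro hm
    exact absurd (Finset.mem_range.2 (by omega)) hm

theorem pv_inner (tmp : List (List Int)) (n i : Nat) (hn : 1 ≤ n) (hi : i < n) (s : Int × Int) :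
    (List.range n).foldl (fun (s : Int × Int) (j : Nat) =>
        if (i : Int) = (j : Int) then
          (s.1, s.2 + PySem.List.pyGetD (PySem.List.pyGetD tmp (i : Int) []) ((j : Nat) : Int) 0)
        else if (i : Int) + (j : Int) = (n : Int) - 1 then
          (s.1 + PySem.List.pyGetD (PySem.List.pyGetD tmp (i : Int) []) ((j : Nat) : Int) 0, s.2)
        else s) s
      = (s.1 + (if i + i = n - 1 then 0 else pvG tmp i (n - 1 - i)), s.2 + pvG tmp i i) := by
  rw [PySem.List.foldl_congr_mem (List.range n) _
      (fun (s : Int × Int) j => (s.1 + pvR tmp n i j, s.2 + pvL tmp i j)) s ?_]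
  · rcases s with ⟨r, l⟩
    rw [pv_foldl_pair_add, pv_sum_R tmp n i hi, pv_sum_L tmp n i hi]
  · intro acc j hj
    simp only [List.mem_range] at hj
    simp only [PySem.List.pyGetD_natCast, pvR, pvL, pvG]
    by_cases h1 : i = j
    · subst h1
      simp
    · rw [if_neg (by exact_mod_cast h1), if_neg h1]
      by_cases h2 : i + j = n - 1
      · rw [if_pos (by omega : (i : Int) + (j : Int) = (n : Int) - 1), if_pos h2]
        simp [h1]
      · rw [if_neg (by omega : ¬ (i : Int) + (j : Int) = (n : Int) - 1), if_neg h2]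
        simp [h1]

theorem pv_main (tmp : List (List Int)) : diagnoal_list tmp = diagnoal_list_alt tmp := by
  rcases tmp with _ | ⟨hd, tl⟩
  · rfl
  · set tmp := hd :: tl with htmp
    have hn : 1 ≤ tmp.length := by simp [htmp]
    set n := tmp.length with hlen
    unfold diagnoal_list diagnoal_list_alt
    simp only [PySem.List.len_eq, ← hlen]
    rw [PySem.List.pyRange_zero_natCast n, PySem.List.enumerate_eq_map_pyRange tmp ([] : List Int),
        PySem.List.len_eq, ← hlen, PySem.List.pyRange_zero_natCast n]
    simp only [List.foldl_map, List.map_map, List.filter_map]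
    rw [PySem.List.foldl_congr_mem (List.range n) _
        (fun (s : Int × Int) i => (s.1 + (if i + i = n - 1 then 0 else pvG tmp i (n - 1 - i)),
                                   s.2 + pvG tmp i i)) ((0 : Int), (0 : Int)) ?_]
    · rw [pv_foldl_pair_add, pv_filter_map_sum]
      dsimp only
      simp only [zero_add]
      congr 1
      · -- right sums agree
        rw [pv_list_sum_range, pv_list_sum_range]
        apply Finset.sum_congr rfl
        intro i hi
        simp only [Finset.mem_range] at hi
        have hcast : (n : Int) - 1 - (i : Int) = ((n - 1 - i : Nat) : Int) := by omega
        simp only [Function.comp_apply, decide_eq_true_eq, hcast, PySem.List.pyGetD_natCast, pvG]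
        by_cases hc : i + i = n - 1
        · simp [hc, (by omega : (i : Int) + (i : Int) = (n : Int) - 1)]
        · simp only [if_neg hc]
          exact (if_pos (by omega : (i : Int) + (i : Int) ≠ (n : Int) - 1)).symm
      · -- left sums agree
        congr 1
        rw [pv_list_sum_range, pv_list_sum_range]
        apply Finset.sum_congr rfl
        intro i _
        simp [Function.comp_apply, PySem.List.pyGetD_natCast, pvG]
    · intro acc i hi
      simp only [List.mem_range] at hi
      exact pv_inner tmp n i hn hi acc

-- ===== VERDICT (by name: the statement is the Claim_ definition above) =====
theorem diagnoal_list_spec : Claim_equal_diagnoal_list := by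
  intro tmp_list _ _
  unfold Spec_diagnoal_list
  exact pv_main tmp_list
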